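-- pv_equiv track=rewrite | github.com/laxdog/advent-of-code | 2020/17/solve.py | count_active2
-- ===== SOURCE A (Python) =====
-- def count_active2(state):
--     count = 0
--     for w, wdata in sorted(state.items()):
--         for z, zdata in sorted(wdata.items()):
--             for y, ydata in sorted(zdata.items()):
--                 s = "".join([x for _, x in sorted(ydata.items())])
--                 count += s.count('#')
--     return count
-- ===== SOURCE B (Python) =====
-- def count_active2(state):
--     def go(v):
--         if isinstance(v, dict):
--             return sum(go(child) for child in v.values())
--         return v.count('#')
--     return go(state)
-- ===== Notes on version B (the rewrite author's own statement) =====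
-- stated objective: simpler
-- what changed: Replaces the four explicit sorted loops and the string join with a uniform recursive tree-sum helper that descends the nested dict and counts '#' at the leaves, dropping all sorting and string building since order is irrelevant to a count.
import Mathlib
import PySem

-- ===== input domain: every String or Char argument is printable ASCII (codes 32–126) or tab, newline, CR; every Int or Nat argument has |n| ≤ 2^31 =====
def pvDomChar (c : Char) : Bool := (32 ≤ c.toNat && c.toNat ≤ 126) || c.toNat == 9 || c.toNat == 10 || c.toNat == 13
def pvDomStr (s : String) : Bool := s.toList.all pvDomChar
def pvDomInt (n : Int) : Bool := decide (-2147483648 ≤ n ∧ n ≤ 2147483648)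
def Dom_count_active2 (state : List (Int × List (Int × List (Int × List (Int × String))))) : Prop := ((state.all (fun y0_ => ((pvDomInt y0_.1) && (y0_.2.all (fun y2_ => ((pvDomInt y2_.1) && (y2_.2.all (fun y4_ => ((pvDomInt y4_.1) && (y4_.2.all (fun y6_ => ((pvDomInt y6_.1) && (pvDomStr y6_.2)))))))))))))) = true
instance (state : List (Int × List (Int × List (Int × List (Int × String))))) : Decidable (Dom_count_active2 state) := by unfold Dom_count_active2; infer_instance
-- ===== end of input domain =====

-- B replaces A's four explicit sorted loops + string join by a uniform recursive tree-sum
-- (count '#' at the leaves, sum over values at the nodes, no sorting): simpler decomposition.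

-- ===== PORT A =====
def count_active2 (state : List (Int × List (Int × List (Int × List (Int × String))))) : Int :=
  (PySem.List.sorted state (fun p => p.1) false).foldl (fun count wp =>
    (PySem.List.sorted wp.2 (fun p => p.1) false).foldl (fun count zp =>
      (PySem.List.sorted zp.2 (fun p => p.1) false).foldl (fun count yp =>
        count +
          (PySem.Str.count
            (PySem.Str.join "" ((PySem.List.sorted yp.2 (fun p => p.1) false).map (fun q => q.2)))
            "#" : Int))
        count) count) 0

-- ===== PORT B =====
-- go(v) at the leaf level: v.count('#')
def altGoY (ydata : List (Int × String)) : Int :=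
  (ydata.map (fun p => (PySem.Str.count p.2 "#" : Int))).sum
-- go(v) one level up: sum(go(child) for child in v.values())
def altGoZ (zdata : List (Int × List (Int × String))) : Int :=
  (zdata.map (fun p => altGoY p.2)).sum
def altGoW (wdata : List (Int × List (Int × List (Int × String)))) : Int :=
  (wdata.map (fun p => altGoZ p.2)).sum
def count_active2_alt (state : List (Int × List (Int × List (Int × List (Int × String))))) : Int :=
  (state.map (fun p => altGoW p.2)).sum

-- ===== PRECONDITION & SPEC =====
def Spec_count_active2 (state : List (Int × List (Int × List (Int × List (Int × String))))) (out : Int) : Prop := out = count_active2_alt state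
instance (state : List (Int × List (Int × List (Int × List (Int × String))))) (out : Int) : Decidable (Spec_count_active2 state out) := by unfold Spec_count_active2; infer_instance

-- ===== CLAIM (what is proved, stated in full; the proofs are below) =====
def Claim_equal_count_active2 : Prop := ∀ (state : List (Int × List (Int × List (Int × List (Int × String))))), Dom_count_active2 state → Spec_count_active2 state (count_active2 state)

-- ===== LEMMAS AND PROOFS =====

-- Chars.count with the single-character pattern "#" is plain character counting.
theorem count_go_hash (l : List Char) : ∀ (fuel acc : Nat), l.length ≤ fuel →
    PySem.Chars.count.go ['#'] fuel l acc = acc + l.count '#' := by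
  induction l with
  | nil => intro fuel acc _; cases fuel <;> simp [PySem.Chars.count.go]
  | cons h t ih =>
    intro fuel acc hle
    cases fuel with
    | zero => exact absurd hle (by simp)
    | succ n =>
      simp only [PySem.Chars.count.go]
      by_cases hh : h = '#'
      · subst hh
        rw [show (['#'].isPrefixOf ('#' :: t)) = true by simp [List.isPrefixOf], if_pos rfl]
        rw [show List.drop (['#'] : List Char).length ('#' :: t) = t by simp]
        rw [ih n (acc + 1) (by simpa using Nat.lt_succ_iff.mp (Nat.lt_of_lt_of_le (Nat.lt_succ_self _) (by simpa using hle)))]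
        simp
        omega
      · rw [show (['#'].isPrefixOf (h :: t)) = false by
            simpa [List.isPrefixOf] using Ne.symm hh, if_neg (by simp)]
        rw [ih n acc (by simpa using hle)]
        simp only [List.count_cons]
        simp [hh]

theorem chars_count_hash (cs : List Char) : PySem.Chars.count cs ['#'] = cs.count '#' := by
  simp only [PySem.Chars.count]
  rw [if_neg (by simp)]
  simpa using count_go_hash cs cs.length 0 le_rfl

-- "".join has no separator: it is flatten.
theorem intercalate_nil_char (parts : List (List Char)) : List.intercalate ([] : List Char) parts = parts.flatten := by
  induction parts with
  | nil => rfl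
  | cons a t ih =>
    cases t with
    | nil => simp [List.intercalate]
    | cons b r =>
      simp only [List.intercalate] at ih ⊢
      simp [List.intersperse, List.flatten] at ih ⊢
      exact ih

-- str.count('#') of "".join(parts) = sum of the per-string counts.
theorem count_hash_join (parts : List String) :
    (PySem.Str.count (PySem.Str.join "" parts) "#" : Int)
      = (parts.map (fun s => (PySem.Str.count s "#" : Int))).sum := by
  rw [PySem.Str.count_eq]
  have hj : (PySem.Str.join "" parts).toList = PySem.Chars.join ([] : List Char) (parts.map String.toList) := by
    simpa using PySem.Str.toList_join "" parts
  rw [hj]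
  simp only [PySem.Chars.join, intercalate_nil_char]
  rw [show ("#".toList) = ['#'] by rfl, chars_count_hash]
  rw [List.count_flatten, List.map_map]
  have hc : ∀ s : String, (PySem.Str.count s "#" : Int) = ((List.count '#' s.toList : Nat) : Int) := fun s => by
    rw [PySem.Str.count_eq, show "#".toList = ['#'] from rfl, chars_count_hash]
  simp only [hc]
  push_cast
  rw [List.map_map]
  simp [Function.comp_def]

-- Summed maps are permutation-invariant, so the sorts do not matter.
theorem sum_map_sorted {α κ : Type} [LinearOrder κ] (xs : List α) (key : α → κ) (f : α → Int) :
    ((PySem.List.sorted xs key false).map f).sum = (xs.map f).sum :=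
  List.Perm.sum_eq (List.Perm.map f (PySem.List.sorted_perm xs key false))

-- The innermost loop over ydata-groups accumulates altGoZ.
theorem loopZ (zdata : List (Int × List (Int × String))) :
    ∀ (c : Int), (PySem.List.sorted zdata (fun p => p.1) false).foldl (fun count yp =>
        count + (PySem.Str.count (PySem.Str.join ""
          ((PySem.List.sorted yp.2 (fun p => p.1) false).map (fun q => q.2))) "#" : Int)) c
      = c + altGoZ zdata := by
  intro c
  rw [PySem.List.foldl_add]
  unfold altGoZ
  congr 1
  rw [sum_map_sorted]
  apply congrArg
  apply List.map_congr_left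
  intro yp _
  rw [count_hash_join]
  unfold altGoY
  rw [List.map_map]
  simp only [Function.comp_def]
  exact sum_map_sorted yp.2 (fun p => p.1) (fun p => (PySem.Str.count p.2 "#" : Int))

theorem loopW (wdata : List (Int × List (Int × List (Int × String)))) :
    ∀ (c : Int), (PySem.List.sorted wdata (fun p => p.1) false).foldl (fun count zp =>
        (PySem.List.sorted zp.2 (fun p => p.1) false).foldl (fun count yp =>
          count + (PySem.Str.count (PySem.Str.join ""
            ((PySem.List.sorted yp.2 (fun p => p.1) false).map (fun q => q.2))) "#" : Int)) count) c
      = c + altGoW wdata := by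
  have h : ∀ (l : List (Int × List (Int × List (Int × String)))) (c : Int),
      l.foldl (fun count zp =>
        (PySem.List.sorted zp.2 (fun p => p.1) false).foldl (fun count yp =>
          count + (PySem.Str.count (PySem.Str.join ""
            ((PySem.List.sorted yp.2 (fun p => p.1) false).map (fun q => q.2))) "#" : Int)) count) c
      = c + (l.map (fun p => altGoZ p.2)).sum := by
    intro l
    induction l with
    | nil => intro c; simp
    | cons a t ih =>
      intro c
      simp only [List.foldl_cons, List.map_cons, List.sum_cons]
      rw [loopZ, ih]
      ring
  intro c
  rw [h]
  unfold altGoW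
  congr 1
  exact sum_map_sorted wdata (fun p => p.1) (fun p => altGoZ p.2)

theorem loopState (state : List (Int × List (Int × List (Int × List (Int × String))))) :
    count_active2 state = count_active2_alt state := by
  unfold count_active2 count_active2_alt
  have h : ∀ (l : List (Int × List (Int × List (Int × List (Int × String))))) (c : Int),
      l.foldl (fun count wp =>
        (PySem.List.sorted wp.2 (fun p => p.1) false).foldl (fun count zp =>
          (PySem.List.sorted zp.2 (fun p => p.1) false).foldl (fun count yp =>
            count + (PySem.Str.count (PySem.Str.join ""
              ((PySem.List.sorted yp.2 (fun p => p.1) false).map (fun q => q.2))) "#" : Int)) count) count) c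
      = c + (l.map (fun p => altGoW p.2)).sum := by
    intro l
    induction l with
    | nil => intro c; simp
    | cons a t ih =>
      intro c
      simp only [List.foldl_cons, List.map_cons, List.sum_cons]
      rw [loopW, ih]
      ring
  rw [h]
  rw [sum_map_sorted state (fun p => p.1) (fun p => altGoW p.2)]
  ring

-- ===== VERDICT (by name: the statement is the Claim_ definition above) =====
theorem count_active2_spec : Claim_equal_count_active2 := by
  intro state _
  unfold Spec_count_active2
  exact loopState state
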